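-- pv_equiv track=rewrite | github.com/nishi10mo/AtCoder | practice/AtCoder Beginner Contest/ABC286/C.py | f
-- ===== SOURCE A (Python) =====
-- from collections import deque
--
-- def f(N, A, B, S):
--     ans = 0
--     for i in range(N//2):
--         if S[i] != S[N-1-i]:
--             ans += B
--     for i in range(N-1):
--         tmp = A*(i+1)
--         que = deque(S)
--         left = que.popleft()
--         que.append(left)
--         S = list(que)
--         for i in range(N//2):
--             if S[i] != S[N-1-i]:
--                 tmp += B
--         ans = min(ans, tmp)
--     return ans
-- ===== SOURCE B (Python) =====
-- def f(N, A, B, S):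
--     # For each left-rotation k (0..N-1, k=0 only when N<=1) the cost is
--     # A*k plus B per mismatched palindrome pair; indices are read from the
--     # ORIGINAL string via modular arithmetic instead of materializing each
--     # rotated copy.
--     T = list(S)
--     L = len(T)
--
--     def mism(k):
--         c = 0
--         for i in range(N // 2):
--             if T[(k + i) % L] != T[(k + N - 1 - i) % L]:
--                 c += B
--         return c
--
--     return min(A * k + mism(k) for k in range(max(N, 1)))
-- ===== Notes on version B (the rewrite author's own statement) =====
-- stated objective: alternative
-- what changed: B replaces A's per-rotation deque rebuild (popleft/append/list materialization of every rotated copy) with modular index arithmetic into the original string and a single min over a generator of rotation costs.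
import Mathlib
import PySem

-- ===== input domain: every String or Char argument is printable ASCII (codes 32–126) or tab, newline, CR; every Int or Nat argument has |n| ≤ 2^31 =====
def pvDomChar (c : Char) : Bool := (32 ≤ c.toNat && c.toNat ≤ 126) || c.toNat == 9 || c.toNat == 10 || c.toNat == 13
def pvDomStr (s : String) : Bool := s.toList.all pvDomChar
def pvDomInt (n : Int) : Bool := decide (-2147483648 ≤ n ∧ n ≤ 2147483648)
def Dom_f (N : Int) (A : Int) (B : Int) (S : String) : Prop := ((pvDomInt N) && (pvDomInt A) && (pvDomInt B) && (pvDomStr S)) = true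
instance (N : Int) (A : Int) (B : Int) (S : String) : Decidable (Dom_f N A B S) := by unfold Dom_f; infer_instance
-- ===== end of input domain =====

-- B replaces A's per-rotation deque rebuild with modular index arithmetic into the
-- original string; same asymptotic cost, genuinely different traversal (objective: alternative).

-- ===== PORT A =====
-- A's inner mismatch loop (it appears twice in A, accumulating B into a running total);
-- out-of-range S[i] compares Option values, which only differs from Python outside Pre_f.
def mismA (N B : Int) (l : List Char) (init : Int) : Int :=
  (PySem.List.pyRange 0 (PySem.Int.floordiv N 2) 1).foldl
    (fun acc i => if PySem.List.pyGet? l i ≠ PySem.List.pyGet? l (N - 1 - i) then acc + B else acc) init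

-- deque(S); popleft; append: one left rotation (popleft on [] raises in Python, outside Pre_f)
def rotA (l : List Char) : List Char :=
  match l with
  | [] => []
  | c :: rest => rest ++ [c]

-- the body of A's rotation loop (S2/tmp are the loop's local variables)
def stepA (N A B : Int) (st : List Char × Int) (i : Int) : List Char × Int :=
  let S2 := rotA st.1
  let tmp := mismA N B S2 (A * (i + 1))
  (S2, min st.2 tmp)

def f (N : Int) (A : Int) (B : Int) (S : String) : Int :=
  let S0 := S.toList
  let ans0 := mismA N B S0 0
  let st := (PySem.List.pyRange 0 (N - 1) 1).foldl (stepA N A B) (S0, ans0)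
  st.2

-- ===== PORT B =====
-- the nested helper 'mism' of Source B
def mismB (N B : Int) (T : List Char) (L : Int) (k : Int) : Int :=
  (PySem.List.pyRange 0 (PySem.Int.floordiv N 2) 1).foldl
    (fun acc i =>
      if PySem.List.pyGet? T (PySem.Int.mod (k + i) L) ≠
         PySem.List.pyGet? T (PySem.Int.mod (k + N - 1 - i) L) then acc + B else acc) 0

def f_alt (N : Int) (A : Int) (B : Int) (S : String) : Int :=
  let T := S.toList
  let L : Int := (T.length : Int)
  let costs := (PySem.List.pyRange 0 (max N 1) 1).map (fun k => A * k + mismB N B T L k)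
  (PySem.List.min? costs (fun x => x)).getD 0

-- ===== PRECONDITION & SPEC =====
-- Pre_f is exactly A's return domain: when 2 ≤ N and N > len(S), A's S[N-1] raises IndexError.
def Pre_f (N : Int) (A : Int) (B : Int) (S : String) : Prop :=
  N ≤ (S.toList.length : Int) ∨ N ≤ 1
instance (N : Int) (A : Int) (B : Int) (S : String) : Decidable (Pre_f N A B S) := by
  unfold Pre_f; infer_instance
def pvWitness_f : Int × Int × Int × String := (4, 1, 2, "abca")

def Spec_f (N : Int) (A : Int) (B : Int) (S : String) (out : Int) : Prop := out = f_alt N A B S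
instance (N : Int) (A : Int) (B : Int) (S : String) (out : Int) : Decidable (Spec_f N A B S out) := by unfold Spec_f; infer_instance

-- ===== CLAIM (what is proved, stated in full; the proofs are below) =====
def Claim_equal_f : Prop := ∀ (N : Int) (A : Int) (B : Int) (S : String), Dom_f N A B S → Pre_f N A B S → Spec_f N A B S (f N A B S)

-- ===== LEMMAS AND PROOFS =====

-- the k-th left rotation of T (k = number of popleft/append steps A has performed)
def rotk (T : List Char) : Nat → List Char
  | 0 => T
  | k + 1 => rotA (rotk T k)

theorem rotA_length (l : List Char) : (rotA l).length = l.length := by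
  cases l <;> simp [rotA]

theorem rotk_length (T : List Char) (k : Nat) : (rotk T k).length = T.length := by
  induction k with
  | zero => rfl
  | succ k ih => simp [rotk, rotA_length, ih]

theorem rotA_getElem? (l : List Char) (j : Nat) (hj : j < l.length) :
    (rotA l)[j]? = l[(j + 1) % l.length]? := by
  cases l with
  | nil => simp at hj
  | cons c rest =>
    show (rest ++ [c])[j]? = (c :: rest)[(j + 1) % (rest.length + 1)]?
    rcases Nat.lt_or_ge j rest.length with h | h
    · rw [List.getElem?_append_left h]
      have hm : (j + 1) % (rest.length + 1) = j + 1 := Nat.mod_eq_of_lt (by omega)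
      rw [hm, List.getElem?_cons_succ]
    · have hj' : j = rest.length := by simp at hj; omega
      subst hj'
      have hm : (rest.length + 1) % (rest.length + 1) = 0 := Nat.mod_self _
      rw [hm, List.getElem?_concat_length, List.getElem?_cons_zero]

theorem rotk_getElem? (T : List Char) (k j : Nat) (hj : j < T.length) :
    (rotk T k)[j]? = T[(k + j) % T.length]? := by
  have hL : 0 < T.length := by omega
  induction k generalizing j with
  | zero =>
    have : j % T.length = j := Nat.mod_eq_of_lt hj
    simp [rotk, this]
  | succ k ih =>
    have hlen : (rotk T k).length = T.length := rotk_length T k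
    have h1 : (rotk T (k + 1))[j]? = (rotk T k)[(j + 1) % T.length]? := by
      have := rotA_getElem? (rotk T k) j (by omega)
      rw [hlen] at this
      exact this
    rw [h1, ih ((j + 1) % T.length) (Nat.mod_lt _ hL)]
    rw [Nat.add_mod_mod, show k + (j + 1) = k + 1 + j from by omega]

theorem rotk_pyGet? (T : List Char) (k : Nat) (i : Int) (h0 : 0 ≤ i) (hi : i < (T.length : Int)) :
    PySem.List.pyGet? (rotk T k) i
      = PySem.List.pyGet? T (PySem.Int.mod ((k : Int) + i) (T.length : Int)) := by
  have hL : (0 : Int) < (T.length : Int) := lt_of_le_of_lt h0 hi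
  rw [PySem.Int.mod_eq_emod_of_pos hL]
  have hcast : (k : Int) + i = ((k + i.toNat : Nat) : Int) := by push_cast; omega
  have hmod : ((k : Int) + i) % (T.length : Int) = (((k + i.toNat) % T.length : Nat) : Int) := by
    rw [hcast]; exact_mod_cast rfl
  rw [hmod]
  rw [PySem.List.pyGet?_of_nonneg _ h0, PySem.List.pyGet?_natCast]
  have := rotk_getElem? T k i.toNat (by omega)
  simpa using this

theorem foldl_ite_add {α : Type} (p : α → Prop) [DecidablePred p] (B : Int) (l : List α)
    (init : Int) :
    l.foldl (fun acc x => if p x then acc + B else acc) init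
      = init + l.foldl (fun acc x => if p x then acc + B else acc) 0 := by
  induction l generalizing init with
  | nil => simp
  | cons x t ih =>
    by_cases h : p x
    · simp only [List.foldl_cons, if_pos h]
      rw [ih (init + B), ih (0 + B)]; ring
    · simp only [List.foldl_cons, if_neg h]
      exact ih init

theorem mism_eq (N B : Int) (T : List Char) (k : Nat) (init : Int)
    (hN : 2 ≤ N) (hL : N ≤ (T.length : Int)) :
    mismA N B (rotk T k) init = init + mismB N B T (T.length : Int) (k : Int) := by
  unfold mismA mismB
  rw [foldl_ite_add (fun i => PySem.List.pyGet? (rotk T k) i ≠ PySem.List.pyGet? (rotk T k) (N - 1 - i)) B]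
  congr 1
  apply PySem.List.foldl_congr_mem
  intro acc i hi
  rw [PySem.List.mem_pyRange_one] at hi
  rw [PySem.Int.floordiv_eq_ediv_of_pos (by norm_num)] at hi
  have h1 : 0 ≤ i ∧ i < (T.length : Int) := by omega
  have h2 : 0 ≤ N - 1 - i ∧ N - 1 - i < (T.length : Int) := by omega
  rw [rotk_pyGet? T k i h1.1 h1.2, rotk_pyGet? T k (N - 1 - i) h2.1 h2.2]
  have : (k : Int) + (N - 1 - i) = (k : Int) + N - 1 - i := by ring
  rw [this]

theorem outer (N A B : Int) (T : List Char) (hN : 2 ≤ N) (hL : N ≤ (T.length : Int))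
    (n : Nat) :
    ∀ (j : Int), 0 ≤ j → j ≤ N - 1 → (N - 1 - j).toNat = n → ∀ (acc : Int),
      ((PySem.List.pyRange j (N - 1) 1).foldl (stepA N A B) (rotk T j.toNat, acc)).2
      = ((PySem.List.pyRange (j + 1) N 1).map
          (fun k => A * k + mismB N B T (T.length : Int) k)).foldl min acc := by
  induction n with
  | zero =>
    intro j h0 hj hn acc
    have hje : j = N - 1 := by omega
    subst hje
    rw [PySem.List.pyRange_one_eq_nil (le_refl _), PySem.List.pyRange_one_eq_nil (by omega)]
    simp
  | succ n ih =>
    intro j h0 hj hn acc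
    have hlt : j < N - 1 := by omega
    rw [PySem.List.pyRange_one_cons hlt, List.foldl_cons]
    have hrot : rotA (rotk T j.toNat) = rotk T ((j + 1).toNat) := by
      have h : (j + 1).toNat = j.toNat + 1 := by omega
      rw [h]; rfl
    have hcast : (((j + 1).toNat : Nat) : Int) = j + 1 := by omega
    have hmism : mismA N B (rotA (rotk T j.toNat)) (A * (j + 1))
        = A * (j + 1) + mismB N B T (T.length : Int) (j + 1) := by
      rw [hrot, mism_eq N B T ((j + 1).toNat) (A * (j + 1)) hN hL, hcast]
    have hstep : stepA N A B (rotk T j.toNat, acc) j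
        = (rotk T ((j + 1).toNat), min acc (A * (j + 1) + mismB N B T (T.length : Int) (j + 1))) := by
      show (rotA (rotk T j.toNat), min acc (mismA N B (rotA (rotk T j.toNat)) (A * (j + 1))))
        = _
      rw [hmism, hrot]
    rw [hstep]
    rw [ih (j + 1) (by omega) (by omega) (by omega) (min acc (A * (j + 1) + mismB N B T (T.length : Int) (j + 1)))]
    rw [PySem.List.pyRange_one_cons (by omega : j + 1 < N), List.map_cons, List.foldl_cons]

theorem f_eq_min (N A B : Int) (S : String) (hPre : Pre_f N A B S) :
    f N A B S = f_alt N A B S := by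
  rcases le_or_gt N 1 with hN1 | hN2
  · -- N ≤ 1 : no rotation, empty mismatch range, both sides are 0
    have hfd : PySem.Int.floordiv N 2 ≤ 0 := by
      rw [PySem.Int.floordiv_eq_ediv_of_pos (by norm_num)]; omega
    have hmA : mismA N B S.toList 0 = 0 := by
      unfold mismA; rw [PySem.List.pyRange_one_eq_nil (by omega)]; rfl
    have hmB : mismB N B S.toList (S.toList.length : Int) 0 = 0 := by
      unfold mismB; rw [PySem.List.pyRange_one_eq_nil (by omega)]; rfl
    unfold f f_alt
    show ((PySem.List.pyRange 0 (N - 1) 1).foldl (stepA N A B) (S.toList, mismA N B S.toList 0)).2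
      = (PySem.List.min? ((PySem.List.pyRange 0 (max N 1) 1).map
          (fun k => A * k + mismB N B S.toList (S.toList.length : Int) k)) (fun x => x)).getD 0
    rw [PySem.List.pyRange_one_eq_nil (by omega : N - 1 ≤ 0)]
    simp only [List.foldl_nil, max_eq_right hN1]
    rw [PySem.List.pyRange_one_cons (by norm_num : (0 : Int) < 1),
      show (0 : Int) + 1 = 1 from by norm_num,
      PySem.List.pyRange_one_eq_nil (le_refl (1 : Int)), List.map_cons, List.map_nil,
      PySem.List.min?_id_cons]
    simp only [List.foldl_nil, Option.getD_some]
    rw [hmA, hmB]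
    ring
  · -- 2 ≤ N
    have hL : N ≤ (S.toList.length : Int) := by
      rcases hPre with h | h
      · exact h
      · omega
    unfold f f_alt
    show ((PySem.List.pyRange 0 (N - 1) 1).foldl (stepA N A B) (S.toList, mismA N B S.toList 0)).2
      = (PySem.List.min? ((PySem.List.pyRange 0 (max N 1) 1).map
          (fun k => A * k + mismB N B S.toList (S.toList.length : Int) k)) (fun x => x)).getD 0
    have h0 : mismA N B S.toList 0 = mismB N B S.toList (S.toList.length : Int) 0 := by
      have := mism_eq N B S.toList 0 0 (by omega) hL
      simpa [rotk] using this
    have houter := outer N A B S.toList (by omega) hL (N - 1).toNat 0 (by omega) (by omega)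
      (by omega) (mismA N B S.toList 0)
    simp only [Int.toNat_zero, rotk] at houter
    rw [show (0 : Int) + 1 = 1 from rfl] at houter
    rw [houter]
    rw [max_eq_left (by omega : (1 : Int) ≤ N)]
    rw [PySem.List.pyRange_one_cons (by omega : (0 : Int) < N), List.map_cons,
      PySem.List.min?_id_cons]
    simp [h0]

-- ===== VERDICT (by name: the statement is the Claim_ definition above) =====
theorem f_spec : Claim_equal_f := by
  intro N A B S _ hPre
  unfold Spec_f
  exact f_eq_min N A B S hPre
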